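-- pv_equiv track=rewrite | github.com/off-by-none/AdventOfCode | scripts/2015/aoc201505.py | contains_bad_strings
-- ===== SOURCE A (Python) =====
-- def contains_bad_strings(string):
--     previous_letter = ''
--     bad_strings = ['ab', 'cd', 'pq', 'xy']
--
--     for letter in string:
--         if previous_letter + letter in bad_strings:
--             return True
--         previous_letter = letter
--
--     return False
-- ===== SOURCE B (Python) =====
-- def contains_bad_strings(string):
--     bad_strings = ['ab', 'cd', 'pq', 'xy']
--     return any(bad in string for bad in bad_strings)
-- ===== Notes on version B (the rewrite author's own statement) =====
-- stated objective: idiomatic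
-- what changed: Instead of scanning characters while tracking the previous letter, B iterates over the four forbidden patterns and tests each with Python's built-in substring search, which coincides with adjacent-pair detection because every pattern has length 2.
import Mathlib
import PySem

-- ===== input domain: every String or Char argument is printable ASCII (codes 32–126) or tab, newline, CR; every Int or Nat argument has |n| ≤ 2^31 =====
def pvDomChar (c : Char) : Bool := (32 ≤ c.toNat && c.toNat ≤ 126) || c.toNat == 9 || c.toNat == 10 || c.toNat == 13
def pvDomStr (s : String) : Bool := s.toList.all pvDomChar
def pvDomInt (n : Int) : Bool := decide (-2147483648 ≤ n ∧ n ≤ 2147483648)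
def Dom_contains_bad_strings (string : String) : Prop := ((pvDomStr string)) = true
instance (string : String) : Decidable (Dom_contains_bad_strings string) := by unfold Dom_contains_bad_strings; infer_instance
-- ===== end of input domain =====

-- B replaces A's character scan with previous-letter state by a loop over the four
-- patterns using substring search (equivalent since each pattern has length 2); idiomatic.

-- ===== PORT A =====
-- A scans the characters keeping previous_letter, returning True as soon as
-- previous_letter + letter is one of the bad strings.
def pvBadPairsA : List (List Char) := [['a','b'], ['c','d'], ['p','q'], ['x','y']]

def pvLoopA : List Char → List Char → Bool
  | _, [] => false
  | prev, c :: rest => if pvBadPairsA.contains (prev ++ [c]) then true else pvLoopA [c] rest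

def contains_bad_strings (string : String) : Bool := pvLoopA [] string.toList

-- ===== PORT B =====
def pvBadStringsB : List String := ["ab", "cd", "pq", "xy"]

def contains_bad_strings_alt (string : String) : Bool :=
  pvBadStringsB.any (fun bad => PySem.Str.isIn bad string)

-- ===== PRECONDITION & SPEC =====
def Spec_contains_bad_strings (string : String) (out : Bool) : Prop := out = contains_bad_strings_alt string
instance (string : String) (out : Bool) : Decidable (Spec_contains_bad_strings string out) := by unfold Spec_contains_bad_strings; infer_instance

-- ===== CLAIM (what is proved, stated in full; the proofs are below) =====
def Claim_equal_contains_bad_strings : Prop := ∀ (string : String), Dom_contains_bad_strings string → Spec_contains_bad_strings string (contains_bad_strings string)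

-- ===== LEMMAS AND PROOFS =====

-- reference: does the char list contain an adjacent bad pair?
def pvHasPair : List Char → Bool
  | x :: y :: r => pvBadPairsA.contains [x, y] || pvHasPair (y :: r)
  | _ => false

theorem pvLoopA_eq_hasPair (x : Char) (l : List Char) : pvLoopA [x] l = pvHasPair (x :: l) := by
  induction l generalizing x with
  | nil => simp [pvLoopA, pvHasPair]
  | cons c rest ih =>
    simp only [pvLoopA, pvHasPair, ih, List.singleton_append]
    cases h : pvBadPairsA.contains [x, c] <;> simp_all


theorem contains_eq_hasPair (s : String) : contains_bad_strings s = pvHasPair s.toList := by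
  unfold contains_bad_strings
  cases h : s.toList with
  | nil => simp [pvLoopA, pvHasPair]
  | cons c rest =>
    have : pvBadPairsA.contains ([] ++ [c]) = false := by
      simp [pvBadPairsA]
    simp only [pvLoopA, this, Bool.false_eq_true, if_false]
    exact pvLoopA_eq_hasPair c rest

theorem hasPair_iff (l : List Char) : pvHasPair l = true ↔ ∃ p ∈ pvBadPairsA, p <:+: l := by
  induction l with
  | nil =>
    constructor
    · intro h; simp [pvHasPair] at h
    · rintro ⟨p, hp, hinf⟩
      have := List.eq_nil_of_infix_nil hinf
      subst this; simp [pvBadPairsA] at hp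
  | cons x t iht =>
    cases t with
    | nil =>
      constructor
      · intro h; simp [pvHasPair] at h
      · rintro ⟨p, hp, hinf⟩
        have hlen : p.length ≤ 1 := by
          have := hinf.length_le; simpa using this
        fin_cases hp <;> simp at hlen
    | cons y r =>
      constructor
      · intro h
        simp only [pvHasPair, Bool.or_eq_true] at h
        rcases h with h | h
        · exact ⟨[x, y], by simpa using h, ⟨[], r, by simp⟩⟩
        · rcases (iht).1 h with ⟨p, hp, hinf⟩
          exact ⟨p, hp, List.infix_cons hinf⟩
      · rintro ⟨p, hp, hinf⟩
        rcases List.infix_cons_iff.1 hinf with hpre | hinf'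
        · -- p is a prefix of x :: y :: r; every bad p has length 2, so p = [x, y]
          have h2 : p.length = 2 := by fin_cases hp <;> rfl
          obtain ⟨a, b, rfl⟩ : ∃ a b, p = [a, b] := by
            match p, h2 with
            | [a, b], _ => exact ⟨a, b, rfl⟩
          rcases hpre with ⟨suf, hsuf⟩
          simp only [List.cons_append, List.nil_append, List.cons.injEq] at hsuf
          obtain ⟨rfl, rfl, -⟩ := hsuf
          simp only [pvHasPair, Bool.or_eq_true]
          exact Or.inl (by simpa using hp)
        · simp only [pvHasPair, Bool.or_eq_true]
          exact Or.inr (iht.2 ⟨p, hp, hinf'⟩)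

theorem alt_iff (s : String) : contains_bad_strings_alt s = true ↔ ∃ p ∈ pvBadPairsA, p <:+: s.toList := by
  unfold contains_bad_strings_alt
  simp only [List.any_eq_true, PySem.Str.isIn_iff_infix]
  constructor
  · rintro ⟨bad, hbad, hinf⟩
    exact ⟨bad.toList, by fin_cases hbad <;> simp [pvBadPairsA], hinf⟩
  · rintro ⟨p, hp, hinf⟩
    fin_cases hp
    · exact ⟨"ab", by simp [pvBadStringsB], hinf⟩
    · exact ⟨"cd", by simp [pvBadStringsB], hinf⟩
    · exact ⟨"pq", by simp [pvBadStringsB], hinf⟩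
    · exact ⟨"xy", by simp [pvBadStringsB], hinf⟩

-- ===== VERDICT (by name: the statement is the Claim_ definition above) =====
theorem contains_bad_strings_spec : Claim_equal_contains_bad_strings := by
  intro s _
  unfold Spec_contains_bad_strings
  rw [contains_eq_hasPair]
  have h1 := hasPair_iff s.toList
  have h2 := alt_iff s
  cases hb : pvHasPair s.toList with
  | false =>
    cases ha : contains_bad_strings_alt s with
    | false => rfl
    | true => exact absurd (h1.2 (h2.1 ha)) (by simp [hb])
  | true => exact (h2.2 (h1.1 hb)).symm
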